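-- pv_equiv track=rewrite | github.com/keepvaibin/pokeshop | inventory/standard_format.py | clean_regulation_marks
-- ===== SOURCE A (Python) =====
-- def normalize_regulation_mark(value) -> str:
--     return str(value or '').strip().upper()
--
-- def clean_regulation_marks(values) -> list[str]:
--     if not isinstance(values, list):
--         return []
--
--     cleaned = []
--     seen = set()
--     for value in values:
--         mark = normalize_regulation_mark(value)
--         if len(mark) != 1 or not mark.isalpha() or mark in seen:
--             continue
--         seen.add(mark)
--         cleaned.append(mark)
--     return cleaned
-- ===== SOURCE B (Python) =====
-- def normalize_regulation_mark(value) -> str: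
--     return str(value or '').strip().upper()
--
-- def _dedup_rec(marks):
--     # recursion: emit the head, then recurse on the remainder with every
--     # copy of the head filtered out -- no seen-set is ever maintained
--     if not marks:
--         return []
--     head = marks[0]
--     return [head] + _dedup_rec([m for m in marks[1:] if m != head])
--
-- def clean_regulation_marks(values) -> list[str]:
--     if not isinstance(values, list):
--         return []
--     valid = [m for m in (normalize_regulation_mark(v) for v in values)
--              if len(m) == 1 and m.isalpha()]
--     return _dedup_rec(valid)
-- ===== Notes on version B (the rewrite author's own statement) =====
-- stated objective: alternative
-- what changed: Replaces A's single pass that carries an explicit seen-set with a filtering pass producing the valid marks followed by a recursive deduplication that emits the head and recurses on the remainder with all copies of the head filtered out, so no membership structure is maintained at all.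
import Mathlib
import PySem

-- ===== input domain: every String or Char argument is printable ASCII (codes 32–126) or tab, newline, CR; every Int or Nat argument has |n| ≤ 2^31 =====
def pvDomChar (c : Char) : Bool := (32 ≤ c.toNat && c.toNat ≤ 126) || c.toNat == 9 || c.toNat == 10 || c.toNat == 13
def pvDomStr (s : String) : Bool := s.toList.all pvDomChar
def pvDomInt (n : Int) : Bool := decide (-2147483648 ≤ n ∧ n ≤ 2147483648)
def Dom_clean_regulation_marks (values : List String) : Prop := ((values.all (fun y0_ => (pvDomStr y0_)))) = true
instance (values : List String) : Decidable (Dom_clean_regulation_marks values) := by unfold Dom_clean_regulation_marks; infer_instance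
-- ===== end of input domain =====

-- B replaces A's seen-set pass by a filter pass plus a recursive dedup that removes the head's copies from the remainder (alternative decomposition, same values).


-- ===== PORT A =====
-- shared helper: normalize_regulation_mark (identical in A and B); 'value or ""' is the if-else on emptiness
def normalize_regulation_mark (value : String) : String :=
  PySem.Str.upper (PySem.Str.strip (if value = "" then "" else value))

-- A's loop body: the continue-guard, then seen.add / cleaned.append on the pair state
def cleanStep (st : List String × PySem.Set String) (mark : String) : List String × PySem.Set String :=
  if PySem.Str.len mark ≠ 1 ∨ PySem.Str.strIsalpha mark = false ∨ PySem.Set.contains st.2 mark = true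
  then st
  else (st.1 ++ [mark], PySem.Set.add st.2 mark)

def clean_regulation_marks (values : List String) : List String :=
  (values.foldl (fun st value => cleanStep st (normalize_regulation_mark value))
    ([], PySem.Set.empty)).1

-- ===== PORT B =====
-- B's recursive dedup: emit the head, recurse on the tail with the head's copies removed
def dedupRec : List String → List String
  | [] => []
  | h :: t => h :: dedupRec (t.filter (fun m => m != h))
termination_by xs => xs.length
decreasing_by
  simpa using Nat.lt_succ_of_le (List.length_filter_le _ t)

def clean_regulation_marks_alt (values : List String) : List String :=
  dedupRec
    ((values.map normalize_regulation_mark).filter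
      (fun m => PySem.Str.len m == 1 && PySem.Str.strIsalpha m))

-- ===== PRECONDITION & SPEC =====
def Spec_clean_regulation_marks (values : List String) (out : List String) : Prop := out = clean_regulation_marks_alt values
instance (values : List String) (out : List String) : Decidable (Spec_clean_regulation_marks values out) := by unfold Spec_clean_regulation_marks; infer_instance

-- ===== CLAIM (what is proved, stated in full; the proofs are below) =====
def Claim_equal_clean_regulation_marks : Prop := ∀ (values : List String), Dom_clean_regulation_marks values → Spec_clean_regulation_marks values (clean_regulation_marks values)

-- ===== LEMMAS AND PROOFS =====
-- Loop invariant for A: in the pair state cleaned = seen (as lists), and the loop is exactly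
-- folding Set.add over the marks that pass the length-1/alpha filter.
theorem cleanStep_loop (marks : List String) (s : PySem.Set String) :
    (marks.foldl cleanStep (s, s)).1 =
    (marks.filter (fun m => PySem.Str.len m == 1 && PySem.Str.strIsalpha m)).foldl PySem.Set.add s := by
  induction marks generalizing s with
  | nil => rfl
  | cons v vs ih =>
    simp only [List.foldl_cons, List.filter_cons]
    by_cases h1 : PySem.Str.len v = 1
    · by_cases h2 : PySem.Str.strIsalpha v = true
      · have hp : (PySem.Str.len v == 1 && PySem.Str.strIsalpha v) = true := by
          rw [h1, h2]; rfl
        by_cases h3 : PySem.Set.contains s v = true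
        · have hs : PySem.Set.add s v = s := by
            unfold PySem.Set.add; rw [if_pos h3]
          have hstep : cleanStep (s, s) v = (s, s) := by
            unfold cleanStep; rw [if_pos (Or.inr (Or.inr h3))]
          rw [hp, if_pos rfl, List.foldl_cons, hs, hstep]
          exact ih s
        · have hadd : PySem.Set.add s v = s ++ [v] := by
            unfold PySem.Set.add; rw [if_neg h3]
          have hstep : cleanStep (s, s) v = (s ++ [v], PySem.Set.add s v) := by
            unfold cleanStep
            rw [if_neg (by push Not; exact ⟨h1, by simpa using h2, h3⟩)]
          rw [hp, if_pos rfl, List.foldl_cons, hstep, hadd]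
          exact ih (s ++ [v])
      · have h2' : PySem.Str.strIsalpha v = false := by
          simpa [Bool.not_eq_true] using h2
        have hp : (PySem.Str.len v == 1 && PySem.Str.strIsalpha v) = false := by
          rw [h2']; simp
        have hstep : cleanStep (s, s) v = (s, s) := by
          unfold cleanStep; rw [if_pos (Or.inr (Or.inl h2'))]
        rw [hp, if_neg Bool.false_ne_true, hstep]
        exact ih s
    · have hp : (PySem.Str.len v == 1 && PySem.Str.strIsalpha v) = false := by
        rw [beq_eq_false_iff_ne.mpr h1]; rfl
      have hstep : cleanStep (s, s) v = (s, s) := by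
        unfold cleanStep; rw [if_pos (Or.inl h1)]
      rw [hp, if_neg Bool.false_ne_true, hstep]
      exact ih s

-- Folding Set.add over t starting from s appends exactly dedupRec of the not-yet-seen elements.
theorem foldl_add_eq_dedupRec (t : List String) (s : PySem.Set String) :
    t.foldl PySem.Set.add s = s ++ dedupRec (t.filter (fun m => !PySem.Set.contains s m)) := by
  induction t generalizing s with
  | nil => simp [dedupRec]
  | cons h t' ih =>
    simp only [List.foldl_cons, List.filter_cons]
    by_cases hc : PySem.Set.contains s h = true
    · have hs : PySem.Set.add s h = s := by
        unfold PySem.Set.add; rw [if_pos hc]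
      rw [hs, hc]
      simpa using ih s
    · have hadd : PySem.Set.add s h = s ++ [h] := by
        unfold PySem.Set.add; rw [if_neg hc]
      have hc' : PySem.Set.contains s h = false := by
        simpa [Bool.not_eq_true] using hc
      rw [hadd, hc']
      simp only [Bool.not_false, if_pos]
      rw [ih (s ++ [h]), dedupRec, List.filter_filter]
      have hfe : ∀ m : String, m ∈ t' →
          (!PySem.Set.contains (s ++ [h]) m) = ((m != h) && !PySem.Set.contains s m) := by
        intro m _
        by_cases he : m = h <;>
          simp [PySem.Set.contains, List.mem_append, he, bne]
      rw [List.filter_congr hfe]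
      simp

-- ===== VERDICT (by name: the statement is the Claim_ definition above) =====
theorem clean_regulation_marks_spec : Claim_equal_clean_regulation_marks := by
  intro values _
  unfold Spec_clean_regulation_marks clean_regulation_marks clean_regulation_marks_alt
  rw [← List.foldl_map]
  show (List.foldl cleanStep ((PySem.Set.empty : PySem.Set String), (PySem.Set.empty : PySem.Set String))
      (values.map normalize_regulation_mark)).1 = _
  rw [cleanStep_loop, foldl_add_eq_dedupRec]
  have hid : ∀ m : String,
      m ∈ (values.map normalize_regulation_mark).filter
        (fun m => PySem.Str.len m == 1 && PySem.Str.strIsalpha m) →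
      (!PySem.Set.contains PySem.Set.empty m) = true := by
    intro m _; rfl
  rw [List.filter_eq_self.mpr hid]
  rfl
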